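-- pv_equiv track=rewrite | github.com/sas062/beng203_assigment2 | A2_p1_helpers.py | build_transcript_bins
-- ===== SOURCE A (Python) =====
-- def build_transcript_bins(exon_spans, bin_size=50):
--     transcript_bins = []
--     current_bin = []
--     current_len = 0
--
--     for start, end in exon_spans:
--         while start < end:
--             take = min(bin_size - current_len, end - start)
--             current_bin.append((start, start + take))
--             current_len += take
--             start += take
--             if current_len == bin_size:
--                 transcript_bins.append(current_bin)
--                 current_bin = []
--                 current_len = 0
--
--     if current_bin:
--         transcript_bins.append(current_bin)
--     return transcript_bins
-- ===== SOURCE B (Python) =====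
-- def build_transcript_bins(exon_spans, bin_size=50):
--     # pass 1: cut exons at bin boundaries into flat segments labelled with their bin index
--     segs = []
--     total = 0
--     for start, end in exon_spans:
--         while start < end:
--             idx = total // bin_size
--             take = min(end - start, (idx + 1) * bin_size - total)
--             segs.append(((start, start + take), idx))
--             start += take
--             total += take
--     # pass 2: group each maximal run of consecutive segments sharing a bin index
--     return _group(segs)
--
-- def _group(segs):
--     bins = []
--     i = 0
--     n = len(segs)
--     while i < n:
--         idx = segs[i][1]
--         j = i + 1
--         while j < n and segs[j][1] == idx:
--             j += 1
--         bins.append([s for s, _ in segs[i:j]])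
--         i = j
--     return bins
-- ===== Notes on version B (the rewrite author's own statement) =====
-- stated objective: alternative
-- what changed: Replaces A's single stateful pass (current_bin/current_len state machine that closes a bin when current_len hits bin_size) by two phases: cut every exon at bin boundaries derived arithmetically from a cumulative offset (bin index = total // bin_size), then group consecutive equally-indexed segments into bins with a recursive span-based grouper.
import Mathlib
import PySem

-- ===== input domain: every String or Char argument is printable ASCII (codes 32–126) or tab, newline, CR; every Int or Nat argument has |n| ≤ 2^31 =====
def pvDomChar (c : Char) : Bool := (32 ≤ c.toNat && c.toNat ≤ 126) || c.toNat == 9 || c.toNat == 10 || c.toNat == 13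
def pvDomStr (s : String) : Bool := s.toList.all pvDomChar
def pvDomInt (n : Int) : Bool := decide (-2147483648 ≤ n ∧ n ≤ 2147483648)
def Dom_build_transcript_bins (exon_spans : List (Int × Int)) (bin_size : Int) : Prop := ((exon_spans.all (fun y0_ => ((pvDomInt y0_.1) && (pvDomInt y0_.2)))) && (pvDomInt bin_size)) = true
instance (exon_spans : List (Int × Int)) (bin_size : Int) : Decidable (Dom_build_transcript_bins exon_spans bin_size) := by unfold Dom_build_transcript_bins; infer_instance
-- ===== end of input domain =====

-- B replaces A's current_len state machine by an arithmetic cut-and-label pass (bin index = total // bin_size)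
-- followed by a separate grouping pass; objective: alternative decomposition, same cost.


-- ===== PORT A =====
-- A's inner while loop, fuel = (end - start).toNat (enough inside Pre_, where each step advances start by ≥ 1)
def cutA (fuel : Nat) (start e bs : Int) (bins : List (List (Int × Int))) (cur : List (Int × Int)) (len : Int) :
    List (List (Int × Int)) × List (Int × Int) × Int :=
  match fuel with
  | 0 => (bins, cur, len)
  | f + 1 =>
    if start < e then
      let take := min (bs - len) (e - start)
      let cur' := cur ++ [(start, start + take)]
      let len' := len + take
      if len' = bs then cutA f (start + take) e bs (bins ++ [cur']) [] 0
      else cutA f (start + take) e bs bins cur' len'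
    else (bins, cur, len)

def build_transcript_bins (exon_spans : List (Int × Int)) (bin_size : Int) : List (List (Int × Int)) :=
  let st := exon_spans.foldl
    (fun (st : List (List (Int × Int)) × List (Int × Int) × Int) p =>
      cutA (p.2 - p.1).toNat p.1 p.2 bin_size st.1 st.2.1 st.2.2) ([], [], 0)
  if st.2.1 ≠ [] then st.1 ++ [st.2.1] else st.1

-- ===== PORT B =====
-- B's inner while loop: emit labelled segments, advancing the cumulative offset `total`
def cutB (fuel : Nat) (start e bs total : Int) : List ((Int × Int) × Int) × Int :=
  match fuel with
  | 0 => ([], total)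
  | f + 1 =>
    if start < e then
      let idx := PySem.Int.floordiv total bs
      let take := min (e - start) ((idx + 1) * bs - total)
      let r := cutB f (start + take) e bs (total + take)
      (((start, start + take), idx) :: r.1, r.2)
    else ([], total)

def segsB (exons : List (Int × Int)) (bs total : Int) : List ((Int × Int) × Int) :=
  match exons with
  | [] => []
  | (s, e) :: rest =>
    let r := cutB (e - s).toNat s e bs total
    r.1 ++ segsB rest bs r.2

-- B's _group: span off the run of segments sharing the first segment's bin index, recurse
def groupSegs : List ((Int × Int) × Int) → List (List (Int × Int))
  | [] => []
  | (seg, idx) :: rest =>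
    (seg :: (rest.takeWhile (fun q => q.2 == idx)).map (·.1)) ::
      groupSegs (rest.dropWhile (fun q => q.2 == idx))
  termination_by l => l.length
  decreasing_by
    exact Nat.lt_succ_of_le (List.length_dropWhile_le _ _)

def build_transcript_bins_alt (exon_spans : List (Int × Int)) (bin_size : Int) : List (List (Int × Int)) :=
  groupSegs (segsB exon_spans bin_size 0)

-- ===== PRECONDITION & SPEC =====
-- Pre_ excludes exactly the inputs where A loops forever (never returns): bin_size ≤ 0 together
-- with at least one exon having start < end.
def Pre_build_transcript_bins (exon_spans : List (Int × Int)) (bin_size : Int) : Prop :=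
  0 < bin_size ∨ ∀ p ∈ exon_spans, p.2 ≤ p.1
instance (exon_spans : List (Int × Int)) (bin_size : Int) : Decidable (Pre_build_transcript_bins exon_spans bin_size) := by unfold Pre_build_transcript_bins; infer_instance
def pvWitness_build_transcript_bins : (List (Int × Int)) × Int := ([(0, 7), (10, 12)], 3)

def Spec_build_transcript_bins (exon_spans : List (Int × Int)) (bin_size : Int) (out : List (List (Int × Int))) : Prop := out = build_transcript_bins_alt exon_spans bin_size
instance (exon_spans : List (Int × Int)) (bin_size : Int) (out : List (List (Int × Int))) : Decidable (Spec_build_transcript_bins exon_spans bin_size out) := by unfold Spec_build_transcript_bins; infer_instance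

-- ===== CLAIM (what is proved, stated in full; the proofs are below) =====
def Claim_equal_build_transcript_bins : Prop := ∀ (exon_spans : List (Int × Int)) (bin_size : Int), Dom_build_transcript_bins exon_spans bin_size → Pre_build_transcript_bins exon_spans bin_size → Spec_build_transcript_bins exon_spans bin_size (build_transcript_bins exon_spans bin_size)

-- ===== LEMMAS AND PROOFS =====

-- A's epilogue: append the trailing partial bin
def finA (st : List (List (Int × Int)) × List (Int × Int) × Int) : List (List (Int × Int)) :=
  if st.2.1 ≠ [] then st.1 ++ [st.2.1] else st.1

-- attach the open partial bin `cur` to the first group (A never closes a partial bin mid-stream)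
def glue (cur : List (Int × Int)) : List (List (Int × Int)) → List (List (Int × Int))
  | [] => if cur = [] then [] else [cur]
  | g :: gs => (cur ++ g) :: gs

theorem groupSegs_nil : groupSegs [] = [] := by
  rw [groupSegs.eq_def]

theorem groupSegs_cons (seg : Int × Int) (idx : Int) (rest : List ((Int × Int) × Int)) :
    groupSegs ((seg, idx) :: rest) =
      (seg :: (rest.takeWhile (fun q => q.2 == idx)).map (·.1)) ::
        groupSegs (rest.dropWhile (fun q => q.2 == idx)) := by
  rw [groupSegs.eq_def]

theorem glue_nil (G : List (List (Int × Int))) : glue [] G = G := by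
  cases G <;> simp [glue]

theorem cutB_nil_total (f : Nat) (s e bs t : Int) (h : (cutB f s e bs t).1 = []) :
    (cutB f s e bs t).2 = t := by
  cases f with
  | zero => rfl
  | succ f => by_cases hs : s < e <;> simp [cutB, hs] at h ⊢

theorem headIdx_cutB (f : Nat) (s e bs t : Int) (x : (Int × Int) × Int)
    (l : List ((Int × Int) × Int)) (h : (cutB f s e bs t).1 = x :: l) :
    x.2 = PySem.Int.floordiv t bs := by
  cases f with
  | zero => simp [cutB] at h
  | succ f =>
    by_cases hs : s < e <;> simp [cutB, hs] at h
    exact (h.1 ▸ rfl)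

theorem headIdx_segsB (exons : List (Int × Int)) (bs : Int) : ∀ (t : Int)
    (x : (Int × Int) × Int) (l : List ((Int × Int) × Int)),
    segsB exons bs t = x :: l → x.2 = PySem.Int.floordiv t bs := by
  induction exons with
  | nil => intro t x l h; simp [segsB] at h
  | cons p rest ih =>
    intro t x l h
    obtain ⟨s, e⟩ := p
    simp only [segsB] at h
    cases hc : (cutB (e - s).toNat s e bs t).1 with
    | nil =>
      rw [hc, List.nil_append] at h
      have := cutB_nil_total (e - s).toNat s e bs t hc
      rw [this] at h
      exact ih t x l h
    | cons y m =>
      rw [hc] at h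
      have hx : y = x := by simpa using congrArg (·.headI) (by simpa using h : y :: (m ++ segsB rest bs _) = x :: l)
      exact hx ▸ headIdx_cutB _ s e bs t y m hc

theorem headIdx_stream (f : Nat) (s e bs t : Int) (rest : List (Int × Int))
    (x : (Int × Int) × Int) (l : List ((Int × Int) × Int))
    (h : (cutB f s e bs t).1 ++ segsB rest bs (cutB f s e bs t).2 = x :: l) :
    x.2 = PySem.Int.floordiv t bs := by
  cases hc : (cutB f s e bs t).1 with
  | nil =>
    rw [hc, List.nil_append, cutB_nil_total f s e bs t hc] at h
    exact headIdx_segsB rest bs t x l h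
  | cons y m =>
    rw [hc, List.cons_append] at h
    exact (List.cons.injEq .. ▸ h).1 ▸ headIdx_cutB f s e bs t y m hc

-- grouping: a segment whose index continues the stream's first run joins the open bin
theorem glue_cons_same (cur seg : _) (i : Int) (w : List ((Int × Int) × Int))
    (hw : w = [] ∨ ∃ x l, w = x :: l ∧ x.2 = i) :
    glue cur (groupSegs ((seg, i) :: w)) = glue (cur ++ [seg]) (groupSegs w) := by
  rcases hw with rfl | ⟨x, l, rfl, hx⟩
  · simp [groupSegs_nil, groupSegs_cons, glue]
  · obtain ⟨xs, xi⟩ := x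
    cases hx
    simp [groupSegs_cons, glue]

-- grouping: a segment whose index differs from the stream's head starts its own (closed) bin
theorem glue_cons_new (cur seg : _) (i : Int) (w : List ((Int × Int) × Int))
    (hw : w = [] ∨ ∃ x l, w = x :: l ∧ x.2 ≠ i) :
    glue cur (groupSegs ((seg, i) :: w)) = (cur ++ [seg]) :: groupSegs w := by
  rcases hw with rfl | ⟨x, l, rfl, hx⟩
  · simp [groupSegs_nil, groupSegs_cons, glue]
  · obtain ⟨xs, xi⟩ := x
    simp only [ne_eq] at hx
    simp [groupSegs_cons, glue, hx]

-- the heart: A's stateful fold equals B's labelled stream, grouped, given the offset invariant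
theorem main_inv (bs : Int) (hbs : 0 < bs) : ∀ (exons : List (Int × Int))
    (bins : List (List (Int × Int))) (cur : List (Int × Int)) (len t : Int),
    0 ≤ t → len = t % bs → (cur = [] ↔ len = 0) →
    finA (exons.foldl
      (fun (st : List (List (Int × Int)) × List (Int × Int) × Int) p =>
        cutA (p.2 - p.1).toNat p.1 p.2 bs st.1 st.2.1 st.2.2) (bins, cur, len)) =
      bins ++ glue cur (groupSegs (segsB exons bs t)) := by
  intro exons
  induction exons with
  | nil =>
    intro bins cur len t ht hlen hcur
    by_cases hc : cur = [] <;> simp [finA, hc, segsB, groupSegs_nil, glue]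
  | cons p rest ih =>
    intro bins cur len t ht hlen hcur
    obtain ⟨s, e⟩ := p
    simp only [List.foldl_cons, segsB]
    -- inner induction on the fuel, both loops stepping in lockstep
    suffices h : ∀ (f : Nat) (s : Int) (bins : List (List (Int × Int)))
        (cur : List (Int × Int)) (len t : Int), 0 ≤ t → len = t % bs → (cur = [] ↔ len = 0) →
        finA (rest.foldl
          (fun (st : List (List (Int × Int)) × List (Int × Int) × Int) p =>
            cutA (p.2 - p.1).toNat p.1 p.2 bs st.1 st.2.1 st.2.2)
          (cutA f s e bs bins cur len)) =
        bins ++ glue cur (groupSegs ((cutB f s e bs t).1 ++ segsB rest bs (cutB f s e bs t).2)) by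
      exact h (e - s).toNat s bins cur len t ht hlen hcur
    intro f
    induction f with
    | zero =>
      intro s bins cur len t ht hlen hcur
      simpa [cutA, cutB] using ih bins cur len t ht hlen hcur
    | succ f ihf =>
      intro s bins cur len t ht hlen hcur
      by_cases hse : s < e
      case neg =>
        simp only [cutA, cutB, if_neg hse]
        simpa using ih bins cur len t ht hlen hcur
      case pos =>
      have hfd : PySem.Int.floordiv t bs = t / bs := PySem.Int.floordiv_eq_ediv_of_pos hbs
      have hdm := Int.ediv_add_emod t bs
      have hlen0 : 0 ≤ len := hlen ▸ Int.emod_nonneg t (by omega)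
      have hlenlt : len < bs := hlen ▸ Int.emod_lt_of_pos t hbs
      have hring : (t / bs + 1) * bs = bs * (t / bs) + bs := by ring
      have hBtake : min (e - s) ((PySem.Int.floordiv t bs + 1) * bs - t) = min (bs - len) (e - s) := by
        rw [hfd]
        have hx : (t / bs + 1) * bs - t = bs - len := by omega
        rw [hx, min_comm]
      set take := min (bs - len) (e - s) with htk
      have htkbd : 1 ≤ take ∧ take ≤ bs - len ∧ take ≤ e - s := by
        refine ⟨?_, min_le_left _ _, min_le_right _ _⟩
        rw [htk]; simp only [le_min_iff]; omega
      have hcB : cutB (f + 1) s e bs t =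
          (((s, s + take), PySem.Int.floordiv t bs) :: (cutB f (s + take) e bs (t + take)).1,
            (cutB f (s + take) e bs (t + take)).2) := by
        simp only [cutB, if_pos hse, hBtake]
      have hstream : (cutB (f + 1) s e bs t).1 ++ segsB rest bs (cutB (f + 1) s e bs t).2 =
          ((s, s + take), PySem.Int.floordiv t bs) ::
            ((cutB f (s + take) e bs (t + take)).1 ++
              segsB rest bs (cutB f (s + take) e bs (t + take)).2) := by
        rw [hcB]
        rfl
      have hcA : cutA (f + 1) s e bs bins cur len =
          if len + take = bs then cutA f (s + take) e bs (bins ++ [cur ++ [(s, s + take)]]) [] 0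
          else cutA f (s + take) e bs bins (cur ++ [(s, s + take)]) (len + take) := by
        simp only [cutA, if_pos hse, ← htk]
      rw [hstream, hcA]
      by_cases hfill : len + take = bs
      · -- the bin fills: A closes it; the next segment (if any) carries the next index
        rw [if_pos hfill]
        have h1 : t + take = bs * (t / bs + 1) := by
          have h2 : bs * (t / bs + 1) = bs * (t / bs) + bs := by ring
          omega
        have hq' : (t + take) / bs = t / bs + 1 := by
          rw [h1, Int.mul_ediv_cancel_left _ (by omega : bs ≠ 0)]
        have hm' : (t + take) % bs = 0 := by rw [h1, Int.mul_emod_right]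
        have hrec := ihf (s + take) (bins ++ [cur ++ [(s, s + take)]]) [] 0 (t + take)
          (by omega) hm'.symm (by simp)
        rw [hrec, glue_nil]
        set w := (cutB f (s + take) e bs (t + take)).1 ++
          segsB rest bs (cutB f (s + take) e bs (t + take)).2 with hw
        have hhead : w = [] ∨ ∃ x l, w = x :: l ∧ x.2 ≠ PySem.Int.floordiv t bs := by
          cases hwc : w with
          | nil => exact Or.inl rfl
          | cons x l =>
            refine Or.inr ⟨x, l, rfl, ?_⟩
            have hx := headIdx_stream f (s + take) e bs (t + take) rest x l (by rw [← hw]; exact hwc)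
            rw [hx, PySem.Int.floordiv_eq_ediv_of_pos hbs, hq', hfd]
            omega
        rw [glue_cons_new cur (s, s + take) (PySem.Int.floordiv t bs) w hhead]
        simp
      · -- the bin is not yet full: the segment joins the open bin on both sides
        rw [if_neg hfill]
        have hlt : len + take < bs := by omega
        have h1 : t + take = (len + take) + bs * (t / bs) := by omega
        have hq' : (t + take) / bs = t / bs := by
          rw [h1, Int.add_mul_ediv_left _ _ (by omega : bs ≠ 0),
            Int.ediv_eq_zero_of_lt (by omega) (by omega), zero_add]
        have hm' : (t + take) % bs = len + take := by
          rw [h1, Int.add_mul_emod_self_left, Int.emod_eq_of_lt (by omega) (by omega)]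
        have hrec := ihf (s + take) bins (cur ++ [(s, s + take)]) (len + take) (t + take)
          (by omega) hm'.symm
          (by refine ⟨fun h => absurd h (by simp), fun h => absurd h (by omega)⟩)
        rw [hrec]
        set w := (cutB f (s + take) e bs (t + take)).1 ++
          segsB rest bs (cutB f (s + take) e bs (t + take)).2 with hw
        have hhead : w = [] ∨ ∃ x l, w = x :: l ∧ x.2 = PySem.Int.floordiv t bs := by
          cases hwc : w with
          | nil => exact Or.inl rfl
          | cons x l =>
            refine Or.inr ⟨x, l, rfl, ?_⟩
            have hx := headIdx_stream f (s + take) e bs (t + take) rest x l (by rw [← hw]; exact hwc)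
            rw [hx, PySem.Int.floordiv_eq_ediv_of_pos hbs, hq', hfd]
        rw [glue_cons_same cur (s, s + take) (PySem.Int.floordiv t bs) w hhead]

-- the degenerate disjunct of Pre_: every exon is empty, both sides return []
theorem all_empty_A (bs : Int) (exons : List (Int × Int)) (h : ∀ p ∈ exons, p.2 ≤ p.1)
    (st : List (List (Int × Int)) × List (Int × Int) × Int) :
    exons.foldl (fun st p => cutA (p.2 - p.1).toNat p.1 p.2 bs st.1 st.2.1 st.2.2) st = st := by
  induction exons generalizing st with
  | nil => rfl
  | cons p rest ih =>
    have hp : (p.2 - p.1).toNat = 0 := by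
      have := h p (by simp); omega
    simp only [List.foldl_cons, hp, cutA]
    exact ih (fun q hq => h q (by simp [hq])) st

theorem all_empty_B (bs : Int) (exons : List (Int × Int)) (h : ∀ p ∈ exons, p.2 ≤ p.1) (t : Int) :
    segsB exons bs t = [] := by
  induction exons generalizing t with
  | nil => rfl
  | cons p rest ih =>
    obtain ⟨s, e⟩ := p
    have hp : (e - s).toNat = 0 := by
      have := h (s, e) (by simp); omega
    simp only [segsB, hp, cutB, List.nil_append]
    exact ih (fun q hq => h q (by simp [hq])) t

-- ===== VERDICT (by name: the statement is the Claim_ definition above) =====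
theorem build_transcript_bins_spec : Claim_equal_build_transcript_bins := by
  intro exons bs _ hpre
  unfold Spec_build_transcript_bins build_transcript_bins build_transcript_bins_alt
  by_cases hbs : 0 < bs
  · have := main_inv bs hbs exons [] [] 0 0 le_rfl (by simp) (by simp)
    simpa [finA, glue_nil] using this
  · rcases hpre with h | h
    · exact absurd h hbs
    · rw [all_empty_B bs exons h 0]
      simp only [all_empty_A bs exons h ([], [], 0)]
      simp [groupSegs_nil]
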